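-- pv_equiv track=rewrite | github.com/KSH23/algorithm_practice | SWEA/1221/1221_01.py | num_code
-- ===== SOURCE A (Python) =====
-- def num_code(n, code):
--     code_list = ["ZRO", "ONE", "TWO", "THR", "FOR", "FIV", "SIX", "SVN", "EGT", "NIN"]
--     code_cnt = [0] * 10
--
--     # 각 문자를 다 숫자로 바꿈
--     for i in range(n):
--         for j in range(10):
--             if code_list[j] == code[i]:
--                 code_cnt[j] += 1
--
--     result = ''
--     for i in range(10):
--         for j in range(code_cnt[i]):
--             result += code_list[i] + ' '
--
--     return result
-- ===== SOURCE B (Python) =====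
-- def num_code(n, code):
--     words = ["ZRO", "ONE", "TWO", "THR", "FOR", "FIV", "SIX", "SVN", "EGT", "NIN"]
--     order = {w: d for d, w in enumerate(words)}
--     picked = [code[i] for i in range(n) if code[i] in order]
--     picked.sort(key=lambda w: order[w])
--     return ''.join(w + ' ' for w in picked)
-- ===== Notes on version B (the rewrite author's own statement) =====
-- stated objective: alternative
-- what changed: A counts each word into ten fixed buckets and rebuilds the output from the buckets with nested loops; B instead collects the recognized words into a list, sorts that list by each word's digit index, and joins the sorted words directly.
import Mathlib
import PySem

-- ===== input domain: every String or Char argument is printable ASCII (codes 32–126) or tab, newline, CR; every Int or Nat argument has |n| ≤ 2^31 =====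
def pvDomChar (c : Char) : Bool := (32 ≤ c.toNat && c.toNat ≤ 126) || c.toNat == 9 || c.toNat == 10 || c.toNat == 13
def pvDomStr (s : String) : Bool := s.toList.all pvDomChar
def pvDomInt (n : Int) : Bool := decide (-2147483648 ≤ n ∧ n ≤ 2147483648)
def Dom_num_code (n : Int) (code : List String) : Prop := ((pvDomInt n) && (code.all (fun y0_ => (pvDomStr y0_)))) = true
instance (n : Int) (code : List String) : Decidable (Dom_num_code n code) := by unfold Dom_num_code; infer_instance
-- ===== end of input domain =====

-- B replaces A's ten fixed counting buckets and its bucket-rebuilding nested output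
-- loops by collecting the recognized words, stably sorting them by digit index and
-- joining them (objective: alternative). Equivalence is claimed on 0 ≤ n ≤ len(code).

-- ===== PORT A =====
def num_code (n : Int) (code : List String) : String :=
  let code_list : List String := ["ZRO", "ONE", "TWO", "THR", "FOR", "FIV", "SIX", "SVN", "EGT", "NIN"]
  let code_cnt : List Int := List.replicate 10 0
  let code_cnt := (PySem.List.pyRange 0 n 1).foldl (fun cnt i =>
      (PySem.List.pyRange 0 10 1).foldl (fun cnt j =>
        if PySem.List.pyGetD code_list j "" == PySem.List.pyGetD code i "" then
          cnt.set j.toNat (PySem.List.pyGetD cnt j 0 + 1)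
        else cnt) cnt) code_cnt
  (PySem.List.pyRange 0 10 1).foldl (fun result i =>
      (PySem.List.pyRange 0 (PySem.List.pyGetD code_cnt i 0) 1).foldl (fun result _ =>
        result ++ PySem.List.pyGetD code_list i "" ++ " ") result) ""

-- ===== PORT B =====
def num_code_alt (n : Int) (code : List String) : String :=
  let words : List String := ["ZRO", "ONE", "TWO", "THR", "FOR", "FIV", "SIX", "SVN", "EGT", "NIN"]
  let order : PySem.Dict String Int :=
    (PySem.List.enumerate words).foldl (fun d p => d.insert p.2 p.1) PySem.Dict.empty
  let picked : List String :=
    (PySem.List.pyRange 0 n 1).foldl (fun acc i =>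
      if order.contains (PySem.List.pyGetD code i "") then
        acc ++ [PySem.List.pyGetD code i ""] else acc) []
  -- picked.sort(key=lambda w: order[w]); every picked word is a key of order,
  -- so Python's order[w] is exactly getD w 0 here
  let sortedPicked := PySem.List.sorted picked (fun w => order.getD w 0) false
  PySem.Str.join "" (sortedPicked.map (fun w => w ++ " "))

-- ===== PRECONDITION & SPEC =====
-- Pre_ excludes exactly n > len(code), where A (and B) raise IndexError on code[i].
def Pre_num_code (n : Int) (code : List String) : Prop := n ≤ code.length
instance (n : Int) (code : List String) : Decidable (Pre_num_code n code) := by unfold Pre_num_code; infer_instance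
def pvWitness_num_code : Int × List String := (3, ["ONE", "NIN", "ONE", "XYZ"])

def Spec_num_code (n : Int) (code : List String) (out : String) : Prop := out = num_code_alt n code
instance (n : Int) (code : List String) (out : String) : Decidable (Spec_num_code n code out) := by unfold Spec_num_code; infer_instance

-- ===== CLAIM (what is proved, stated in full; the proofs are below) =====
def Claim_equal_num_code : Prop := ∀ (n : Int) (code : List String), Dom_num_code n code → Pre_num_code n code → Spec_num_code n code (num_code n code)

-- ===== LEMMAS AND PROOFS =====

def wordsL : List String := ["ZRO", "ONE", "TWO", "THR", "FOR", "FIV", "SIX", "SVN", "EGT", "NIN"]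

def odict : PySem.Dict String Int :=
  PySem.Dict.mk [("ZRO",0),("ONE",1),("TWO",2),("THR",3),("FOR",4),("FIV",5),("SIX",6),("SVN",7),("EGT",8),("NIN",9)]

def keyf (w : String) : Int := odict.getD w 0

def pw (w : String) : Bool := odict.contains w

def cvec (xs : List String) : List Int := wordsL.map (fun w => (xs.count w : Int))

-- the canonical grouped list: all "ZRO"s, then all "ONE"s, …
def ys (xs : List String) : List String :=
  List.replicate (xs.count "ZRO") "ZRO" ++ List.replicate (xs.count "ONE") "ONE" ++
  List.replicate (xs.count "TWO") "TWO" ++ List.replicate (xs.count "THR") "THR" ++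
  List.replicate (xs.count "FOR") "FOR" ++ List.replicate (xs.count "FIV") "FIV" ++
  List.replicate (xs.count "SIX") "SIX" ++ List.replicate (xs.count "SVN") "SVN" ++
  List.replicate (xs.count "EGT") "EGT" ++ List.replicate (xs.count "NIN") "NIN"

def strMul (s : String) (k : Int) : String :=
  PySem.Str.join "" (List.replicate k.toNat s)

theorem step10 (w : String) (c0 c1 c2 c3 c4 c5 c6 c7 c8 c9 : Int) :
    (PySem.List.pyRange 0 10 1).foldl (fun cnt j =>
        if PySem.List.pyGetD wordsL j "" == w then
          cnt.set j.toNat (PySem.List.pyGetD cnt j 0 + 1)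
        else cnt) [c0,c1,c2,c3,c4,c5,c6,c7,c8,c9] =
      [c0 + if w = "ZRO" then 1 else 0, c1 + if w = "ONE" then 1 else 0, c2 + if w = "TWO" then 1 else 0, c3 + if w = "THR" then 1 else 0, c4 + if w = "FOR" then 1 else 0, c5 + if w = "FIV" then 1 else 0, c6 + if w = "SIX" then 1 else 0, c7 + if w = "SVN" then 1 else 0, c8 + if w = "EGT" then 1 else 0, c9 + if w = "NIN" then 1 else 0] := by
  have h : PySem.List.pyRange 0 10 1 = [0,1,2,3,4,5,6,7,8,9] := by decide
  rw [h]
  by_cases h0 : w = "ZRO"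
  · subst h0; simp [List.foldl, wordsL, PySem.List.pyGetD]
  by_cases h1 : w = "ONE"
  · subst h1; simp [List.foldl, wordsL, PySem.List.pyGetD]
  by_cases h2 : w = "TWO"
  · subst h2; simp [List.foldl, wordsL, PySem.List.pyGetD]
  by_cases h3 : w = "THR"
  · subst h3; simp [List.foldl, wordsL, PySem.List.pyGetD]
  by_cases h4 : w = "FOR"
  · subst h4; simp [List.foldl, wordsL, PySem.List.pyGetD]
  by_cases h5 : w = "FIV"
  · subst h5; simp [List.foldl, wordsL, PySem.List.pyGetD]
  by_cases h6 : w = "SIX"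
  · subst h6; simp [List.foldl, wordsL, PySem.List.pyGetD]
  by_cases h7 : w = "SVN"
  · subst h7; simp [List.foldl, wordsL, PySem.List.pyGetD]
  by_cases h8 : w = "EGT"
  · subst h8; simp [List.foldl, wordsL, PySem.List.pyGetD]
  by_cases h9 : w = "NIN"
  · subst h9; simp [List.foldl, wordsL, PySem.List.pyGetD]
  simp [List.foldl, wordsL, PySem.List.pyGetD, h0, Ne.symm h0, h1, Ne.symm h1, h2, Ne.symm h2, h3, Ne.symm h3, h4, Ne.symm h4, h5, Ne.symm h5, h6, Ne.symm h6, h7, Ne.symm h7, h8, Ne.symm h8, h9, Ne.symm h9]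

theorem foldA (xs : List String) :
    xs.foldl (fun cnt w =>
      (PySem.List.pyRange 0 10 1).foldl (fun cnt j =>
        if PySem.List.pyGetD wordsL j "" == w then
          cnt.set j.toNat (PySem.List.pyGetD cnt j 0 + 1)
        else cnt) cnt) (List.replicate 10 (0 : Int)) = cvec xs := by
  induction xs using List.reverseRecOn with
  | nil => simp [cvec, wordsL, List.replicate]
  | append_singleton xs w ih =>
      rw [List.foldl_append, ih]
      simp only [List.foldl]
      have hc : cvec xs = [(xs.count "ZRO" : Int),(xs.count "ONE" : Int),(xs.count "TWO" : Int),(xs.count "THR" : Int),(xs.count "FOR" : Int),(xs.count "FIV" : Int),(xs.count "SIX" : Int),(xs.count "SVN" : Int),(xs.count "EGT" : Int),(xs.count "NIN" : Int)] := by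
        simp [cvec, wordsL]
      rw [hc, step10]
      simp [cvec, wordsL, List.count_append, List.count_cons, beq_iff_eq]

theorem bridge {β : Type} (xs : List String) (n : Int) (h : (xs.length : Int) = n)
    (f : β → String → β) (init : β) :
    (PySem.List.pyRange 0 n 1).foldl (fun acc i => f acc (PySem.List.pyGetD xs i "")) init =
      xs.foldl f init := by
  subst h
  exact PySem.List.foldl_pyRange_zero_pyGetD' xs "" f init

-- replace accesses code[i] over range(0, n) by accesses into the prefix code[:n]
theorem takeCongr {β : Type} (code : List String) (n : Int) (hn : 0 ≤ n)
    (hlen : n ≤ (code.length : Int)) (f : β → String → β) (init : β) :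
    (PySem.List.pyRange 0 n 1).foldl (fun acc i => f acc (PySem.List.pyGetD code i "")) init =
      (PySem.List.pyRange 0 n 1).foldl
        (fun acc i => f acc (PySem.List.pyGetD (code.take n.toNat) i "")) init := by
  apply PySem.List.foldl_congr_mem
  intro acc i hi
  rw [PySem.List.mem_pyRange_one] at hi
  have hxlen : (((code.take n.toNat).length : Nat) : Int) = n := by
    simp [List.length_take]; omega
  have hget2 : PySem.List.pyGetD (code.take n.toNat) i "" = PySem.List.pyGetD code i "" := by
    rw [PySem.List.pyGetD_eq_getElem (code.take n.toNat) "" hi.1 (by rw [hxlen]; exact hi.2),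
        PySem.List.pyGetD_eq_getElem code "" hi.1 (by omega)]
    exact List.getElem_take
  rw [hget2]

theorem chars_join_empty (ls : List (List Char)) : PySem.Chars.join [] ls = ls.flatten := by
  induction ls with
  | nil => simp [PySem.Chars.join_nil]
  | cons p rest ih =>
      cases rest with
      | nil => simp [PySem.Chars.join_singleton]
      | cons q r => rw [PySem.Chars.join_cons_cons, ih]; simp

theorem join_empty_toList (parts : List String) :
    (PySem.Str.join "" parts).toList = (parts.map String.toList).flatten := by
  rw [PySem.Str.toList_join]
  have h : ("" : String).toList = [] := by decide
  rw [h, chars_join_empty]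

theorem strMul_zero (s : String) : strMul s 0 = "" := by
  apply String.toList_inj.mp
  have h : ("" : String).toList = [] := by decide
  rw [strMul, join_empty_toList, h]
  simp

theorem strMul_succ (s : String) (m : Nat) :
    strMul s ((m : Int) + 1) = strMul s (m : Int) ++ s := by
  have h1 : ((m : Int) + 1).toNat = m + 1 := by omega
  have h2 : ((m : Int)).toNat = m := by omega
  apply String.toList_inj.mp
  rw [strMul, strMul, h1, h2, List.replicate_succ']
  rw [String.toList_append, join_empty_toList, join_empty_toList]
  simp

theorem repFold (m : Nat) (s r : String) :
    (PySem.List.pyRange 0 (m : Int) 1).foldl (fun r _ => r ++ s) r = r ++ strMul s (m : Int) := by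
  induction m generalizing r with
  | zero =>
      rw [PySem.List.pyRange_one_eq_nil (by omega)]
      simp [strMul_zero]
  | succ k ih =>
      have hk : ((k + 1 : Nat) : Int) = (k : Int) + 1 := by push_cast; ring
      rw [hk, PySem.List.pyRange_one_succ_right (by omega), List.foldl_append, ih]
      simp only [List.foldl]
      rw [strMul_succ, String.append_assoc]

theorem join10 (a0 a1 a2 a3 a4 a5 a6 a7 a8 a9 : String) :
    PySem.Str.join "" [a0,a1,a2,a3,a4,a5,a6,a7,a8,a9] =
      a0 ++ a1 ++ a2 ++ a3 ++ a4 ++ a5 ++ a6 ++ a7 ++ a8 ++ a9 := by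
  apply String.toList_inj.mp
  rw [join_empty_toList]
  simp

theorem outPhase (k0 k1 k2 k3 k4 k5 k6 k7 k8 k9 : Nat) :
    ([0,1,2,3,4,5,6,7,8,9] : List Int).foldl (fun result i =>
      (PySem.List.pyRange 0 (PySem.List.pyGetD [(k0:Int),(k1:Int),(k2:Int),(k3:Int),(k4:Int),(k5:Int),(k6:Int),(k7:Int),(k8:Int),(k9:Int)] i 0) 1).foldl
        (fun result _ => result ++ PySem.List.pyGetD wordsL i "" ++ " ") result) "" =
      PySem.Str.join "" [strMul ("ZRO" ++ " ") (k0:Int), strMul ("ONE" ++ " ") (k1:Int), strMul ("TWO" ++ " ") (k2:Int), strMul ("THR" ++ " ") (k3:Int), strMul ("FOR" ++ " ") (k4:Int), strMul ("FIV" ++ " ") (k5:Int), strMul ("SIX" ++ " ") (k6:Int), strMul ("SVN" ++ " ") (k7:Int), strMul ("EGT" ++ " ") (k8:Int), strMul ("NIN" ++ " ") (k9:Int)] := by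
  simp only [List.foldl]
  simp [wordsL, PySem.List.pyGetD, PySem.List.pyGet?, PySem.List.pyIdx?, String.append_assoc]
  rw [repFold, repFold, repFold, repFold, repFold, repFold, repFold, repFold, repFold, repFold]
  rw [join10]
  simp [String.append_assoc]

-- ---- B-side lemmas ----

theorem orderLit :
    (PySem.List.enumerate wordsL).foldl
      (fun (d : PySem.Dict String Int) p => d.insert p.2 p.1) PySem.Dict.empty = odict := by
  decide

theorem pw_mem {a : String} (h : pw a = true) : a ∈ wordsL := by
  simp [pw, odict, PySem.Dict.contains_mk, List.any_cons, beq_iff_eq] at h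
  rcases h with h|h|h|h|h|h|h|h|h|h <;> simp [wordsL, ← h]

theorem keyInj {a b : String} (ha : a ∈ wordsL) (hb : b ∈ wordsL)
    (h : keyf a = keyf b) : a = b := by
  have hw : wordsL = ["ZRO", "ONE", "TWO", "THR", "FOR", "FIV", "SIX", "SVN", "EGT", "NIN"] := rfl
  rw [hw] at ha hb
  fin_cases ha <;> fin_cases hb <;> first | rfl | (exfalso; revert h; decide)

theorem mem_ys {xs : List String} {b : String} (h : b ∈ ys xs) : b ∈ wordsL := by
  simp [ys, List.mem_append, List.mem_replicate] at h
  rcases h with ⟨_,h⟩|⟨_,h⟩|⟨_,h⟩|⟨_,h⟩|⟨_,h⟩|⟨_,h⟩|⟨_,h⟩|⟨_,h⟩|⟨_,h⟩|⟨_,h⟩ <;> simp [wordsL, h]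

theorem pairwise_groups (key : String → Int) (ws : List String) (c : String → Nat)
    (hws : ws.Pairwise (fun u v => key u ≤ key v)) :
    (ws.flatMap (fun w => List.replicate (c w) w)).Pairwise (fun a b => key a ≤ key b) := by
  induction ws with
  | nil => simp
  | cons w t ih =>
      simp only [List.flatMap_cons]
      rw [List.pairwise_append]
      refine ⟨List.pairwise_replicate.mpr (Or.inr (le_refl _)),
        ih hws.of_cons, ?_⟩
      intro a ha b hb
      rw [List.eq_of_mem_replicate ha]
      obtain ⟨v, hv, hb'⟩ := List.mem_flatMap.mp hb
      rw [List.eq_of_mem_replicate hb']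
      exact (List.pairwise_cons.mp hws).1 v hv

theorem ysPairwise (xs : List String) : (ys xs).Pairwise (fun a b => keyf a ≤ keyf b) := by
  have hform : ys xs = wordsL.flatMap (fun w => List.replicate (xs.count w) w) := by
    simp [ys, wordsL]
  rw [hform]
  exact pairwise_groups keyf wordsL (fun w => xs.count w) (by decide)

theorem countFilter_of_notmem {a : String} (xs : List String) (h : a ∉ wordsL) :
    (xs.filter pw).count a = 0 := by
  rw [List.count_eq_zero]
  intro hmem
  rw [List.mem_filter] at hmem
  exact absurd (pw_mem hmem.2) h

theorem ysPerm (xs : List String) : (ys xs).Perm (xs.filter pw) := by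
  rw [List.perm_iff_count]
  intro a
  by_cases h0 : a = "ZRO"
  · subst h0; rw [List.count_filter (by decide)]; simp [ys, List.count_append, List.count_replicate]
  by_cases h1 : a = "ONE"
  · subst h1; rw [List.count_filter (by decide)]; simp [ys, List.count_append, List.count_replicate]
  by_cases h2 : a = "TWO"
  · subst h2; rw [List.count_filter (by decide)]; simp [ys, List.count_append, List.count_replicate]
  by_cases h3 : a = "THR"
  · subst h3; rw [List.count_filter (by decide)]; simp [ys, List.count_append, List.count_replicate]
  by_cases h4 : a = "FOR"
  · subst h4; rw [List.count_filter (by decide)]; simp [ys, List.count_append, List.count_replicate]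
  by_cases h5 : a = "FIV"
  · subst h5; rw [List.count_filter (by decide)]; simp [ys, List.count_append, List.count_replicate]
  by_cases h6 : a = "SIX"
  · subst h6; rw [List.count_filter (by decide)]; simp [ys, List.count_append, List.count_replicate]
  by_cases h7 : a = "SVN"
  · subst h7; rw [List.count_filter (by decide)]; simp [ys, List.count_append, List.count_replicate]
  by_cases h8 : a = "EGT"
  · subst h8; rw [List.count_filter (by decide)]; simp [ys, List.count_append, List.count_replicate]
  by_cases h9 : a = "NIN"
  · subst h9; rw [List.count_filter (by decide)]; simp [ys, List.count_append, List.count_replicate]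
  have hnm : a ∉ wordsL := by simp [wordsL, h0, h1, h2, h3, h4, h5, h6, h7, h8, h9]
  rw [countFilter_of_notmem xs hnm]
  simp [ys, List.count_append, List.count_replicate,
    Ne.symm h0, Ne.symm h1, Ne.symm h2, Ne.symm h3, Ne.symm h4,
    Ne.symm h5, Ne.symm h6, Ne.symm h7, Ne.symm h8, Ne.symm h9]

theorem sortedEq (xs : List String) :
    PySem.List.sorted (xs.filter pw) keyf false = ys xs := by
  apply List.Perm.eq_of_pairwise (le := fun a b => keyf a ≤ keyf b)
  · intro a b ha hb hab hba
    have ha' : a ∈ wordsL := by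
      rw [PySem.List.mem_sorted, List.mem_filter] at ha
      exact pw_mem ha.2
    exact keyInj ha' (mem_ys hb) (le_antisymm hab hba)
  · exact PySem.List.sorted_pairwise _ _
  · exact ysPairwise xs
  · exact (PySem.List.sorted_perm _ _ _).trans (ysPerm xs).symm

theorem joinB (xs : List String) :
    PySem.Str.join "" ((ys xs).map (fun w => w ++ " ")) =
      PySem.Str.join "" [strMul ("ZRO" ++ " ") (xs.count "ZRO" : Int), strMul ("ONE" ++ " ") (xs.count "ONE" : Int), strMul ("TWO" ++ " ") (xs.count "TWO" : Int), strMul ("THR" ++ " ") (xs.count "THR" : Int), strMul ("FOR" ++ " ") (xs.count "FOR" : Int), strMul ("FIV" ++ " ") (xs.count "FIV" : Int), strMul ("SIX" ++ " ") (xs.count "SIX" : Int), strMul ("SVN" ++ " ") (xs.count "SVN" : Int), strMul ("EGT" ++ " ") (xs.count "EGT" : Int), strMul ("NIN" ++ " ") (xs.count "NIN" : Int)] := by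
  apply String.toList_inj.mp
  rw [join_empty_toList, join_empty_toList]
  simp [ys, strMul, chars_join_empty, List.map_append, List.map_replicate, List.flatten_append]

-- ===== VERDICT (by name: the statement is the Claim_ definition above) =====
theorem num_code_spec : Claim_equal_num_code := by
  intro n code _ hlen
  unfold Pre_num_code at hlen
  unfold Spec_num_code num_code num_code_alt
  simp only []
  have hwords : ["ZRO", "ONE", "TWO", "THR", "FOR", "FIV", "SIX", "SVN", "EGT", "NIN"] = wordsL := rfl
  rw [hwords, orderLit]
  set xs := code.take n.toNat with hxs
  -- A's counting phase
  have hcnt :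
      (PySem.List.pyRange 0 n 1).foldl (fun cnt i =>
        (PySem.List.pyRange 0 10 1).foldl (fun cnt j =>
          if PySem.List.pyGetD wordsL j "" == PySem.List.pyGetD code i "" then
            cnt.set j.toNat (PySem.List.pyGetD cnt j 0 + 1)
          else cnt) cnt) (List.replicate 10 (0 : Int)) = cvec xs := by
    by_cases hn : 0 ≤ n
    · have hxlen : ((xs.length : Nat) : Int) = n := by
        simp [hxs, List.length_take]; omega
      rw [takeCongr code n hn hlen
        (fun cnt w =>
          (PySem.List.pyRange 0 10 1).foldl (fun cnt j =>
            if PySem.List.pyGetD wordsL j "" == w then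
              cnt.set j.toNat (PySem.List.pyGetD cnt j 0 + 1)
            else cnt) cnt) (List.replicate 10 (0 : Int))]
      exact (bridge xs n hxlen
        (fun cnt w =>
          (PySem.List.pyRange 0 10 1).foldl (fun cnt j =>
            if PySem.List.pyGetD wordsL j "" == w then
              cnt.set j.toNat (PySem.List.pyGetD cnt j 0 + 1)
            else cnt) cnt) (List.replicate 10 (0 : Int))).trans (foldA _)
    · rw [PySem.List.pyRange_one_eq_nil (a := 0) (b := n) (by omega)]
      have h0 : n.toNat = 0 := by omega
      simp [hxs, h0, cvec, wordsL]
  rw [hcnt]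
  -- B's collecting phase
  have hpick :
      (PySem.List.pyRange 0 n 1).foldl (fun acc i =>
        if odict.contains (PySem.List.pyGetD code i "") then
          acc ++ [PySem.List.pyGetD code i ""] else acc) ([] : List String) = xs.filter pw := by
    by_cases hn : 0 ≤ n
    · have hxlen : ((xs.length : Nat) : Int) = n := by
        simp [hxs, List.length_take]; omega
      rw [takeCongr code n hn hlen
        (fun (acc : List String) w => if odict.contains w then acc ++ [w] else acc) []]
      rw [bridge xs n hxlen (fun (acc : List String) w => if odict.contains w then acc ++ [w] else acc) []]
      exact (PySem.List.foldl_append_if_eq_filter pw xs []).trans (List.nil_append _)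
    · rw [PySem.List.pyRange_one_eq_nil (a := 0) (b := n) (by omega)]
      have h0 : n.toNat = 0 := by omega
      simp [hxs, h0]
  rw [hpick]
  have hkey : (fun w => odict.getD w 0) = keyf := rfl
  rw [hkey, sortedEq, joinB]
  have h10 : PySem.List.pyRange 0 10 1 = ([0,1,2,3,4,5,6,7,8,9] : List Int) := by decide
  have hc : cvec xs = [((xs.count "ZRO" : Nat) : Int),((xs.count "ONE" : Nat) : Int),((xs.count "TWO" : Nat) : Int),((xs.count "THR" : Nat) : Int),((xs.count "FOR" : Nat) : Int),((xs.count "FIV" : Nat) : Int),((xs.count "SIX" : Nat) : Int),((xs.count "SVN" : Nat) : Int),((xs.count "EGT" : Nat) : Int),((xs.count "NIN" : Nat) : Int)] := by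
    simp [cvec, wordsL]
  rw [h10, hc, outPhase]
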